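-- pv_equiv track=rewrite | github.com/lechibang-1512/scc | benchmark.py | _generate_cpp_code
-- ===== SOURCE A (Python) =====
-- def _generate_cpp_code(lines=1000):
--     """Generate a realistic C++ source file of the given line count."""
--     chunks = []
--     chunks.append('#include <iostream>\n#include <vector>\n#include <string>\nusing namespace std;\n\n')
--     func_count = 0
--     i = len(chunks[0].splitlines())
--     while i < lines:
--         func_count += 1
--         body = [
--             f'int function_{func_count}(int x, double y) {{',
--             f'    // compute result for function {func_count}',
--             f'    string msg = "hello from function_{func_count}";',
--             f'    vector<int> data = {{1, 2, 3, 4, 5}};',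
--             f'    int result = 0;',
--             f'    for (int j = 0; j < static_cast<int>(data.size()); j++) {{',
--             f'        result += data[j] * x;',
--             f'        if (result > 1000) {{',
--             f'            cout << msg << " overflow at " << j << endl;',
--             f'            return -1;',
--             f'        }}',
--             f'    }}',
--             f'    /* multi-line',
--             f'       comment block */',
--             f'    return result;',
--             f'}}',
--             f'',
--         ]
--         chunks.append('\n'.join(body) + '\n')
--         i += len(body)
--
--     chunks.append('\nint main() {\n')
--     for f in range(1, func_count + 1):
--         chunks.append(f'    cout << function_{f}(1, 2.0) << endl;\n')
--     chunks.append('    return 0;\n}\n')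
--     return ''.join(chunks)
-- ===== SOURCE B (Python) =====
-- _HEADER = '#include <iostream>\n#include <vector>\n#include <string>\nusing namespace std;\n\n'
--
-- _FUNC_TEMPLATE = (
--     'int function_{n}(int x, double y) {{\n'
--     '    // compute result for function {n}\n'
--     '    string msg = "hello from function_{n}";\n'
--     '    vector<int> data = {{1, 2, 3, 4, 5}};\n'
--     '    int result = 0;\n'
--     '    for (int j = 0; j < static_cast<int>(data.size()); j++) {{\n'
--     '        result += data[j] * x;\n'
--     '        if (result > 1000) {{\n'
--     '            cout << msg << " overflow at " << j << endl;\n'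
--     '            return -1;\n'
--     '        }}\n'
--     '    }}\n'
--     '    /* multi-line\n'
--     '       comment block */\n'
--     '    return result;\n'
--     '}}\n'
--     '\n'
-- )
--
--
-- def _generate_cpp_code(lines=1000):
--     """Generate a realistic C++ source file of the given line count."""
--     # header is 5 lines, each emitted function block is 17 lines
--     func_count = max(0, (lines - 5 + 16) // 17)
--     funcs = [_FUNC_TEMPLATE.format(n=f) for f in range(1, func_count + 1)]
--     calls = [f'    cout << function_{f}(1, 2.0) << endl;\n' for f in range(1, func_count + 1)]
--     return ''.join([_HEADER] + funcs + ['\nint main() {\n'] + calls + ['    return 0;\n}\n'])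
-- ===== Notes on version B (the rewrite author's own statement) =====
-- stated objective: simpler
-- what changed: Replaces the while-loop that accumulates the function count by stepping a line counter with a closed-form count max(0,(lines-5+16)//17), and replaces the per-line list + '\n'.join emission by a single format template, assembling the output with comprehensions and one join.
import Mathlib
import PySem

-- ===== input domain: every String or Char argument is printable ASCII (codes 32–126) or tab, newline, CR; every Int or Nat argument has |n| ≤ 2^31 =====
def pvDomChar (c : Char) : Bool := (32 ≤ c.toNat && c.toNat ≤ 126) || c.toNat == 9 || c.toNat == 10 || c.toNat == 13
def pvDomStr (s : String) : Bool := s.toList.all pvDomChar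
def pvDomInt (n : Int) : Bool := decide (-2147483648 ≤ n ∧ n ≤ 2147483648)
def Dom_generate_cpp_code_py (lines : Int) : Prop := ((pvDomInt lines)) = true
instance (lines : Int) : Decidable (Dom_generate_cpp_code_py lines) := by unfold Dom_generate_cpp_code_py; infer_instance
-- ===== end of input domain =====

-- B replaces A's while-loop accumulation of the function count by the closed form
-- max(0, (lines-5+16)//17) and the per-line list + '\n'.join by one format template (objective: simpler).

-- ===== PORT A =====
-- the f-string body list built on each iteration of A's while loop
def bodyLinesA (n : Int) : List String :=
  [ "int function_" ++ PySem.Int.toStr n ++ "(int x, double y) {",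
    "    // compute result for function " ++ PySem.Int.toStr n,
    "    string msg = \"hello from function_" ++ PySem.Int.toStr n ++ "\";",
    "    vector<int> data = {1, 2, 3, 4, 5};",
    "    int result = 0;",
    "    for (int j = 0; j < static_cast<int>(data.size()); j++) {",
    "        result += data[j] * x;",
    "        if (result > 1000) {",
    "            cout << msg << \" overflow at \" << j << endl;",
    "            return -1;",
    "        }",
    "    }",
    "    /* multi-line",
    "       comment block */",
    "    return result;",
    "}",
    "" ]

-- A's 'while i < lines' loop: state (func_count, chunks), i += len(body)
def loopA (lines i fc : Int) (chunks : List String) : Int × List String :=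
  if _h : i < lines then
    loopA lines (i + ((bodyLinesA (fc + 1)).length : Int)) (fc + 1)
      (chunks ++ [PySem.Str.join "\n" (bodyLinesA (fc + 1)) ++ "\n"])
  else (fc, chunks)
termination_by (lines - i).toNat
decreasing_by simp [bodyLinesA]; omega

def headerA : String := "#include <iostream>\n#include <vector>\n#include <string>\nusing namespace std;\n\n"

def generate_cpp_code_py (lines : Int) : String :=
  match loopA lines ((PySem.Str.splitlines headerA).length : Int) 0 [headerA] with
  | (fc, chunks) =>
    PySem.Str.join ""
      ((PySem.List.pyRange 1 (fc + 1) 1).foldl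
        (fun acc f => acc ++ ["    cout << function_" ++ PySem.Int.toStr f ++ "(1, 2.0) << endl;\n"])
        (chunks ++ ["\nint main() {\n"])
       ++ ["    return 0;\n}\n"])

-- ===== PORT B =====
-- _FUNC_TEMPLATE.format(n=f): string formatting ported exactly as concatenation around str(n)
def funcBlockB (n : Int) : String :=
  "int function_" ++ PySem.Int.toStr n ++ "(int x, double y) {\n"
  ++ "    // compute result for function " ++ PySem.Int.toStr n ++ "\n"
  ++ "    string msg = \"hello from function_" ++ PySem.Int.toStr n ++ "\";\n"
  ++ "    vector<int> data = {1, 2, 3, 4, 5};\n"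
  ++ "    int result = 0;\n"
  ++ "    for (int j = 0; j < static_cast<int>(data.size()); j++) {\n"
  ++ "        result += data[j] * x;\n"
  ++ "        if (result > 1000) {\n"
  ++ "            cout << msg << \" overflow at \" << j << endl;\n"
  ++ "            return -1;\n"
  ++ "        }\n"
  ++ "    }\n"
  ++ "    /* multi-line\n"
  ++ "       comment block */\n"
  ++ "    return result;\n"
  ++ "}\n"
  ++ "\n"

-- func_count = max(0, (lines - 5 + 16) // 17)
def funcCountB (lines : Int) : Int := max 0 (PySem.Int.floordiv (lines - 5 + 16) 17)

def generate_cpp_code_py_alt (lines : Int) : String :=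
  PySem.Str.join ""
    (["#include <iostream>\n#include <vector>\n#include <string>\nusing namespace std;\n\n"]
     ++ (PySem.List.pyRange 1 (funcCountB lines + 1) 1).map funcBlockB
     ++ ["\nint main() {\n"]
     ++ (PySem.List.pyRange 1 (funcCountB lines + 1) 1).map
          (fun f => "    cout << function_" ++ PySem.Int.toStr f ++ "(1, 2.0) << endl;\n")
     ++ ["    return 0;\n}\n"])

-- ===== PRECONDITION & SPEC =====
def Spec_generate_cpp_code_py (lines : Int) (out : String) : Prop := out = generate_cpp_code_py_alt lines
instance (lines : Int) (out : String) : Decidable (Spec_generate_cpp_code_py lines out) := by unfold Spec_generate_cpp_code_py; infer_instance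

-- ===== CLAIM (what is proved, stated in full; the proofs are below) =====
def Claim_equal_generate_cpp_code_py : Prop := ∀ (lines : Int), Dom_generate_cpp_code_py lines → Spec_generate_cpp_code_py lines (generate_cpp_code_py lines)

-- ===== LEMMAS AND PROOFS =====

-- A's joined body block equals B's formatted template
set_option maxRecDepth 4096 in
theorem block_eq (n : Int) : PySem.Str.join "\n" (bodyLinesA n) ++ "\n" = funcBlockB n := by
  apply String.toList_injective
  simp [bodyLinesA, funcBlockB, PySem.Str.join, PySem.Chars.join, String.toList_append,
    List.intercalate, List.intersperse, List.append_assoc]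

-- A's loop appends one block per iteration: closed-form characterisation of its final state
theorem loopA_spec (lines i fc : Int) (chunks : List String) :
    loopA lines i fc chunks =
      (fc + ((lines - i + 16).toNat / 17 : Nat),
       chunks ++ (PySem.List.pyRange (fc + 1) (fc + ((lines - i + 16).toNat / 17 : Nat) + 1) 1).map
         (fun n => PySem.Str.join "\n" (bodyLinesA n) ++ "\n")) := by
  induction i, fc, chunks using loopA.induct lines with
  | case1 i fc chunks h ih =>
    rw [loopA, dif_pos h]
    have hlen : ((bodyLinesA (fc + 1)).length : Int) = 17 := by simp [bodyLinesA]
    rw [hlen] at ih ⊢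
    rw [ih]
    have hKK : ((lines - i + 16).toNat / 17 : Nat) = ((lines - (i + 17) + 16).toNat / 17 : Nat) + 1 := by
      omega
    rw [Prod.mk.injEq]
    refine ⟨by push_cast [hKK]; ring, ?_⟩
    have hbound : fc + (((lines - i + 16).toNat / 17 : Nat) : Int) + 1
        = fc + 1 + (((lines - (i + 17) + 16).toNat / 17 : Nat) : Int) + 1 := by
      push_cast [hKK]; ring
    rw [hbound,
      PySem.List.pyRange_one_cons
        (show (fc : Int) + 1 < fc + 1 + (((lines - (i + 17) + 16).toNat / 17 : Nat) : Int) + 1 by omega)]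
    simp [List.append_assoc]
  | case2 i fc chunks h =>
    rw [loopA, dif_neg h]
    have hK : ((lines - i + 16).toNat / 17 : Nat) = 0 := by omega
    rw [hK]
    have hnil : PySem.List.pyRange (fc + 1) (fc + ((0 : Nat) : Int) + 1) 1 = [] := by
      simp
    rw [hnil]
    simp

-- the header string splits into 5 lines
theorem headerA_lines : ((PySem.Str.splitlines headerA).length : Int) = 5 := by decide

-- B's closed-form count equals the Nat-division form appearing in loopA_spec
theorem funcCountB_eq (lines : Int) :
    funcCountB lines = (((lines - 5 + 16).toNat / 17 : Nat) : Int) := by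
  unfold funcCountB
  rw [PySem.Int.floordiv_eq_ediv_of_pos (by omega)]
  omega

-- ===== VERDICT (by name: the statement is the Claim_ definition above) =====
theorem generate_cpp_code_py_spec : Claim_equal_generate_cpp_code_py := by
  intro lines _
  unfold Spec_generate_cpp_code_py generate_cpp_code_py generate_cpp_code_py_alt
  rw [headerA_lines, loopA_spec, funcCountB_eq]
  simp only [zero_add]
  rw [PySem.List.foldl_append_singleton_eq_map]
  unfold headerA
  refine congrArg (PySem.Str.join "") ?_
  rw [List.map_congr_left (fun n _ => block_eq n)]
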